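-- pv_equiv track=rewrite | github.com/need-singularity/sylvian-singularity | verify/verify_gz_extreme_hypotheses_wave13.py | durfee_size
-- ===== SOURCE A (Python) =====
-- def durfee_size(partition):
--     """Durfee square = largest d such that partition has ≥ d parts each ≥ d"""
--     sorted_p = sorted(partition, reverse=True)
--     d = 0
--     for k in range(1, len(sorted_p)+1):
--         if sorted_p[k-1] >= k:
--             d = k
--         else:
--             break
--     return d
-- ===== SOURCE B (Python) =====
-- def durfee_size(partition):
--     """Durfee square = largest d such that partition has >= d parts each >= d"""
--     n = len(partition)
--     cnt = [0] * (n + 1)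
--     for x in partition:
--         if x >= 1:
--             cnt[x if x < n else n] += 1
--     ge = 0
--     for d in range(n, 0, -1):
--         ge += cnt[d]
--         if ge >= d:
--             return d
--     return 0
-- ===== Notes on version B (the rewrite author's own statement) =====
-- stated objective: alternative
-- what changed: replaced sort-descending-then-scan with a value-capped counting histogram plus a downward suffix-count scan, removing the sort entirely (O(n) passes instead of a sort, though not measurably faster in CPython)
import Mathlib
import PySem

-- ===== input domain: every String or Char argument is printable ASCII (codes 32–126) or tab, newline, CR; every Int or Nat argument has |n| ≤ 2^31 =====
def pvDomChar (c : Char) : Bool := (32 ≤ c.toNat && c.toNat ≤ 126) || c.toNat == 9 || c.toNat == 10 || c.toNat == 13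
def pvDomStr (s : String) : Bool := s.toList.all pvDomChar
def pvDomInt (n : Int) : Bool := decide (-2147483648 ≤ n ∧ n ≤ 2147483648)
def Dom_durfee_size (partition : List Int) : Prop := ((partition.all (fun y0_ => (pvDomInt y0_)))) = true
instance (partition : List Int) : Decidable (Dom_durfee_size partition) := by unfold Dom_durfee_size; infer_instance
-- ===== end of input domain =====

-- B replaces A's sort-descending-then-scan with a counting histogram (values capped at n)
-- plus a downward suffix-count scan: a sort-free alternative algorithm for the same value.

-- ===== PORT A =====
-- 'for k in range(1, len(sorted_p)+1): if sorted_p[k-1] >= k: d = k else: break';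
-- the index k-1 is always in range, so the total form pyGetD is exact here
def durfeeALoop (sp : List Int) (ks : List Int) (d : Int) : Int :=
  match ks with
  | [] => d
  | k :: rest =>
      if k ≤ PySem.List.pyGetD sp (k - 1) 0 then durfeeALoop sp rest k else d

def durfee_size (partition : List Int) : Int :=
  let sorted_p := PySem.List.sorted partition (fun x => x) true
  durfeeALoop sorted_p (PySem.List.pyRange 1 ((sorted_p.length : Int) + 1) 1) 0

-- ===== PORT B =====
-- 'for x in partition: if x >= 1: cnt[x if x < n else n] += 1'; the index is always in [0, n]
def durfeeBCount (n : Int) (cnt : List Int) (xs : List Int) : List Int :=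
  match xs with
  | [] => cnt
  | x :: rest =>
      if 1 ≤ x then
        durfeeBCount n
          (PySem.List.pySetD cnt (if x < n then x else n)
            (PySem.List.pyGetD cnt (if x < n then x else n) 0 + 1)) rest
      else durfeeBCount n cnt rest

-- 'for d in range(n, 0, -1): ge += cnt[d]; if ge >= d: return d' then 'return 0'
def durfeeBLoop (cnt : List Int) (ds : List Int) (ge : Int) : Int :=
  match ds with
  | [] => 0
  | d :: rest =>
      if d ≤ ge + PySem.List.pyGetD cnt d 0 then d
      else durfeeBLoop cnt rest (ge + PySem.List.pyGetD cnt d 0)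

def durfee_size_alt (partition : List Int) : Int :=
  let n : Int := partition.length
  let cnt := durfeeBCount n (List.replicate (partition.length + 1) 0) partition
  durfeeBLoop cnt (PySem.List.pyRange n 0 (-1)) 0

-- ===== PRECONDITION & SPEC =====
def Spec_durfee_size (partition : List Int) (out : Int) : Prop := out = durfee_size_alt partition
instance (partition : List Int) (out : Int) : Decidable (Spec_durfee_size partition out) := by unfold Spec_durfee_size; infer_instance

-- ===== CLAIM (what is proved, stated in full; the proofs are below) =====
def Claim_equal_durfee_size : Prop := ∀ (partition : List Int), Dom_durfee_size partition → Spec_durfee_size partition (durfee_size partition)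

-- ===== LEMMAS AND PROOFS =====

-- number of parts ≥ k
def durfeeCG (xs : List Int) (k : Int) : Int := (xs.countP (fun x => decide (k ≤ x)) : Int)

-- the common characterisation: r is the largest d in [0, n] with at least d parts ≥ d
def durfeeGood (xs : List Int) (r : Int) : Prop :=
  (r = 0 ∨ (1 ≤ r ∧ r ≤ (xs.length : Int) ∧ r ≤ durfeeCG xs r)) ∧
  (∀ k : Int, r < k → k ≤ (xs.length : Int) → ¬ k ≤ durfeeCG xs k)

theorem durfeeGood_unique (xs : List Int) (r₁ r₂ : Int)
    (h₁ : durfeeGood xs r₁) (h₂ : durfeeGood xs r₂) : r₁ = r₂ := by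
  by_contra hne
  rcases lt_or_gt_of_ne hne with h | h
  · rcases h₂.1 with rfl | ⟨h1, h2, h3⟩
    · rcases h₁.1 with rfl | ⟨g1, _, _⟩ <;> omega
    · exact h₁.2 r₂ h h2 h3
  · rcases h₁.1 with rfl | ⟨h1, h2, h3⟩
    · rcases h₂.1 with rfl | ⟨g1, _, _⟩ <;> omega
    · exact h₂.2 r₁ h h2 h3

theorem durfeeCG_perm (xs ys : List Int) (h : xs.Perm ys) (k : Int) :
    durfeeCG xs k = durfeeCG ys k := by
  unfold durfeeCG
  rw [h.countP_eq]

theorem durfeeCG_antitone (xs : List Int) (m k : Int) (h : m ≤ k) :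
    durfeeCG xs k ≤ durfeeCG xs m := by
  unfold durfeeCG
  have := List.countP_mono_left (l := xs)
    (p := fun x => decide (k ≤ x)) (q := fun x => decide (m ≤ x))
    (fun x _ hx => by simp only [decide_eq_true_eq] at *; omega)
  omega

-- ---- A side ----

-- bridge on a weakly descending list: sp[j] ≥ k  ↔  at least j+1 parts are ≥ k
theorem durfeeBridgeNat (sp : List Int) (hs : sp.Pairwise (fun a b : Int => b ≤ a))
    (j : Nat) (hj : j < sp.length) (k : Int) :
    (k ≤ sp[j] ↔ (j : Int) + 1 ≤ durfeeCG sp k) := by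
  rw [List.pairwise_iff_getElem] at hs
  unfold durfeeCG
  constructor
  · intro h
    have hall : ∀ a ∈ sp.take (j + 1), (fun x => decide (k ≤ x)) a = true := by
      intro a ha
      obtain ⟨i, hi, hieq⟩ := List.getElem_of_mem ha
      have hi' : i < j + 1 := by
        have := hi; rw [List.length_take] at this; omega
      rw [List.getElem_take] at hieq
      have hle : sp[i] ≥ sp[j] := by
        rcases Nat.lt_or_ge i j with hij | hij
        · exact hs i j (by omega) hj hij
        · have : i = j := by omega
          subst this; exact le_refl _
      simp only [decide_eq_true_eq]
      omega
    have htake : (sp.take (j + 1)).countP (fun x => decide (k ≤ x)) = j + 1 := by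
      rw [List.countP_eq_length.2 hall, List.length_take]
      omega
    have hsub := (List.take_sublist (j + 1) sp).countP_le (p := fun x => decide (k ≤ x))
    rw [htake] at hsub
    omega
  · intro h
    by_contra hlt
    have hsplit : sp.countP (fun x => decide (k ≤ x)) =
        (sp.take j).countP (fun x => decide (k ≤ x)) +
        (sp.drop j).countP (fun x => decide (k ≤ x)) := by
      conv_lhs => rw [← List.take_append_drop j sp]
      rw [List.countP_append]
    have hz : (sp.drop j).countP (fun x => decide (k ≤ x)) = 0 := by
      rw [List.countP_eq_zero]
      intro a ha
      obtain ⟨i, hi, hieq⟩ := List.getElem_of_mem ha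
      rw [List.getElem_drop] at hieq
      have hji : j + i < sp.length := by
        have := hi; rw [List.length_drop] at this; omega
      have hle : sp[j + i] ≤ sp[j] := by
        rcases Nat.eq_zero_or_pos i with rfl | hpos
        · simp
        · exact hs j (j + i) hj hji (by omega)
      simp only [decide_eq_true_eq]
      omega
    have htk := List.countP_le_length (p := fun x => decide (k ≤ x)) (l := sp.take j)
    rw [List.length_take] at htk
    omega

theorem durfeeALoop_good (partition sp : List Int) (hperm : sp.Perm partition)
    (hs : sp.Pairwise (fun a b : Int => b ≤ a)) (hlen : sp.length = partition.length) :
    ∀ (t : Nat) (m : Int), 1 ≤ m → m + (t : Int) = (partition.length : Int) + 1 →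
    (∀ k : Int, 1 ≤ k → k < m → k ≤ durfeeCG partition k) →
    durfeeGood partition
      (durfeeALoop sp (PySem.List.pyRange m ((partition.length : Int) + 1) 1) (m - 1)) := by
  intro t
  induction t with
  | zero =>
    intro m hm1 hmt hprev
    rw [PySem.List.pyRange_one_eq_nil (by omega)]
    simp only [durfeeALoop]
    constructor
    · by_cases h0 : m = 1
      · left; omega
      · right
        exact ⟨by omega, by omega, hprev (m - 1) (by omega) (by omega)⟩
    · intro k hk1 hk2
      omega
  | succ t ih =>
    intro m hm1 hmt hprev
    rw [PySem.List.pyRange_one_cons (by omega : m < (partition.length : Int) + 1)]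
    simp only [durfeeALoop]
    have hjlt : (m - 1).toNat < sp.length := by omega
    have hget : PySem.List.pyGetD sp (m - 1) 0 = sp[(m - 1).toNat] :=
      PySem.List.pyGetD_eq_getElem sp 0 (by omega) (by omega)
    have hbr := durfeeBridgeNat sp hs (m - 1).toNat hjlt m
    rw [durfeeCG_perm sp partition hperm] at hbr
    have hcast : (((m - 1).toNat : Int)) = m - 1 := Int.toNat_of_nonneg (by omega)
    by_cases hQ : m ≤ PySem.List.pyGetD sp (m - 1) 0
    · rw [if_pos hQ]
      have hPm : m ≤ durfeeCG partition m := by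
        rw [hget] at hQ
        have := hbr.1 hQ
        omega
      have h := ih (m + 1) (by omega) (by omega)
        (fun k hk1 hk2 => by
          rcases lt_or_eq_of_le (by omega : k ≤ m) with h' | h'
          · exact hprev k hk1 h'
          · subst h'; exact hPm)
      rw [show m + 1 - 1 = m by ring] at h
      exact h
    · rw [if_neg hQ]
      have hnotP : ¬ m ≤ durfeeCG partition m := by
        intro hP
        apply hQ
        rw [hget]
        have := hbr.2 (by omega)
        exact this
      constructor
      · by_cases h0 : m = 1
        · left; omega
        · right
          exact ⟨by omega, by omega, hprev (m - 1) (by omega) (by omega)⟩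
      · intro k hk1 hk2 hPk
        apply hnotP
        have := durfeeCG_antitone partition m k (by omega)
        omega

-- ---- B side ----

-- histogram-cell membership: x is a positive part whose capped value is exactly d
def durfeeCBool (n d x : Int) : Bool := decide (1 ≤ x) && decide ((if x < n then x else n) = d)

-- suffix-count membership: x is a positive part whose capped value is ≥ m
def durfeeGBool (n m x : Int) : Bool := decide (1 ≤ x) && decide (m ≤ (if x < n then x else n))

theorem durfeeCountP_split (p q r : Int → Bool)
    (h : ∀ x : Int, (p x = true ↔ (q x = true ∨ r x = true)) ∧ ¬(q x = true ∧ r x = true)) :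
    ∀ xs : List Int, xs.countP p = xs.countP q + xs.countP r := by
  intro xs
  induction xs with
  | nil => simp
  | cons a l ih =>
    simp only [List.countP_cons, ih]
    have ha := h a
    by_cases hq : q a = true <;> by_cases hr : r a = true <;>
      by_cases hp : p a = true <;> simp [hq, hr, hp] at ha ⊢ <;> omega

theorem durfeeG_split (n m : Int) (xs : List Int) :
    xs.countP (durfeeGBool n m) =
      xs.countP (durfeeGBool n (m + 1)) + xs.countP (durfeeCBool n m) := by
  apply durfeeCountP_split
  intro x
  simp only [durfeeGBool, durfeeCBool, Bool.and_eq_true, decide_eq_true_eq]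
  split_ifs with h <;> constructor <;> omega

theorem durfeeG_top (n : Int) (xs : List Int) :
    xs.countP (durfeeGBool n (n + 1)) = 0 := by
  rw [List.countP_eq_zero]
  intro a _
  simp only [durfeeGBool, Bool.and_eq_true, decide_eq_true_eq]
  split_ifs with h <;> omega

theorem durfeeG_eq_cg (n m : Int) (xs : List Int) (h1 : 1 ≤ m) (h2 : m ≤ n) :
    (xs.countP (durfeeGBool n m) : Int) = durfeeCG xs m := by
  unfold durfeeCG
  congr 1
  apply List.countP_congr
  intro x _
  simp only [durfeeGBool, Bool.and_eq_true, decide_eq_true_eq]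
  split_ifs with h <;> constructor <;> omega

theorem durfeeBCount_getD (n : Int) (hn : 0 ≤ n) :
    ∀ (xs cnt : List Int), (cnt.length : Int) = n + 1 → ∀ d : Int, 0 ≤ d → d ≤ n →
    PySem.List.pyGetD (durfeeBCount n cnt xs) d 0 =
      PySem.List.pyGetD cnt d 0 + (xs.countP (durfeeCBool n d) : Int) := by
  intro xs
  induction xs with
  | nil =>
    intro cnt hlen d hd0 hdn
    simp [durfeeBCount]
  | cons x rest ih =>
    intro cnt hlen d hd0 hdn
    simp only [durfeeBCount]
    by_cases hx : (1 : Int) ≤ x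
    · rw [if_pos hx]
      have hi0 : 0 ≤ (if x < n then x else n) ∧ (if x < n then x else n) ≤ n := by
        split_ifs <;> omega
      set i : Int := if x < n then x else n with hi
      have hlen' : ((PySem.List.pySetD cnt i (PySem.List.pyGetD cnt i 0 + 1)).length : Int) = n + 1 := by
        rw [PySem.List.length_pySetD]; exact hlen
      rw [ih _ hlen' d hd0 hdn]
      have hset : PySem.List.pyGetD (PySem.List.pySetD cnt i (PySem.List.pyGetD cnt i 0 + 1)) d 0 =
          if d = i then PySem.List.pyGetD cnt i 0 + 1 else PySem.List.pyGetD cnt d 0 := by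
        rw [PySem.List.pySetD_of_nonneg cnt _ hi0.1]
        rw [PySem.List.pyGetD_eq_getElem _ 0 hd0 (by rw [List.length_set]; omega)]
        rw [List.getElem_set]
        by_cases hdi : d = i
        · rw [if_pos (by omega : i.toNat = d.toNat), if_pos hdi]
        · rw [if_neg (by omega : ¬ i.toNat = d.toNat), if_neg hdi]
          rw [PySem.List.pyGetD_eq_getElem cnt 0 hd0 (by omega)]
      rw [hset, List.countP_cons]
      have hcb : durfeeCBool n d x = decide (d = i) := by
        simp only [durfeeCBool, hx, decide_true, Bool.true_and, ← hi]
        rw [Bool.eq_iff_iff]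
        simp only [decide_eq_true_eq]
        constructor <;> omega
      by_cases hdi : d = i
      · rw [if_pos hdi, if_pos (by rw [hcb]; simp [hdi])]
        rw [hdi]
        push_cast
        ring
      · rw [if_neg hdi, if_neg (by rw [hcb]; simp [hdi])]
        push_cast
        ring
    · rw [if_neg hx]
      rw [ih _ hlen d hd0 hdn, List.countP_cons]
      rw [if_neg (by simp [durfeeCBool, hx])]
      push_cast
      ring

theorem durfeeBLoop_good (partition cnt : List Int)
    (hcnt : ∀ d : Int, 1 ≤ d → d ≤ (partition.length : Int) →
      PySem.List.pyGetD cnt d 0 = (partition.countP (durfeeCBool (partition.length : Int) d) : Int)) :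
    ∀ (t : Nat) (m : Int), m = (t : Int) → m ≤ (partition.length : Int) →
    (∀ k : Int, m < k → k ≤ (partition.length : Int) → ¬ k ≤ durfeeCG partition k) →
    durfeeGood partition
      (durfeeBLoop cnt (PySem.List.pyRange m 0 (-1))
        ((partition.countP (durfeeGBool (partition.length : Int) (m + 1)) : Int))) := by
  intro t
  induction t with
  | zero =>
    intro m hmt hmn hmax
    rw [PySem.List.pyRange_neg_one_eq_nil (by omega)]
    simp only [durfeeBLoop]
    exact ⟨Or.inl rfl, fun k hk1 hk2 => hmax k (by omega) hk2⟩
  | succ t ih =>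
    intro m hmt hmn hmax
    have hm1 : 1 ≤ m := by omega
    rw [PySem.List.pyRange_neg_one_cons (by omega : (0 : Int) < m)]
    simp only [durfeeBLoop]
    have hge : (partition.countP (durfeeGBool (partition.length : Int) (m + 1)) : Int) +
        PySem.List.pyGetD cnt m 0 =
        (partition.countP (durfeeGBool (partition.length : Int) m) : Int) := by
      rw [hcnt m hm1 hmn, durfeeG_split (partition.length : Int) m partition]
      push_cast
      ring
    have hgcg : (partition.countP (durfeeGBool (partition.length : Int) m) : Int) =
        durfeeCG partition m := durfeeG_eq_cg _ m partition hm1 hmn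
    by_cases hd : m ≤ (partition.countP (durfeeGBool (partition.length : Int) (m + 1)) : Int) +
        PySem.List.pyGetD cnt m 0
    · rw [if_pos hd]
      refine ⟨Or.inr ⟨hm1, hmn, ?_⟩, fun k hk1 hk2 => hmax k hk1 hk2⟩
      rw [hge, hgcg] at hd
      exact hd
    · rw [if_neg hd]
      have hnotP : ¬ m ≤ durfeeCG partition m := by
        rw [hge, hgcg] at hd
        exact hd
      have h := ih (m - 1) (by omega) (by omega)
        (fun k hk1 hk2 => by
          rcases lt_or_eq_of_le (by omega : m ≤ k) with h' | h'
          · exact hmax k h' hk2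
          · subst h'; exact hnotP)
      rw [show m - 1 + 1 = m by ring] at h
      rw [hge]
      exact h

-- ---- assembling the two sides ----

theorem durfeeA_good (partition : List Int) :
    durfeeGood partition (durfee_size partition) := by
  unfold durfee_size
  have hlen : (PySem.List.sorted partition (fun x => x) true).length = partition.length :=
    PySem.List.length_sorted partition (fun x => x) true
  have h := durfeeALoop_good partition (PySem.List.sorted partition (fun x => x) true)
    (PySem.List.sorted_perm partition (fun x => x) true)
    (PySem.List.sorted_pairwise_rev partition (fun x => x))
    hlen partition.length 1 (by omega) (by omega) (fun k hk1 hk2 => by omega)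
  rw [show (1 : Int) - 1 = 0 by ring] at h
  simpa [hlen] using h

theorem durfeeB_good (partition : List Int) :
    durfeeGood partition (durfee_size_alt partition) := by
  unfold durfee_size_alt
  have hrep : ((List.replicate (partition.length + 1) (0 : Int)).length : Int) =
      (partition.length : Int) + 1 := by
    rw [List.length_replicate]; push_cast; ring
  have hcnt : ∀ d : Int, 1 ≤ d → d ≤ (partition.length : Int) →
      PySem.List.pyGetD
        (durfeeBCount (partition.length : Int) (List.replicate (partition.length + 1) 0) partition) d 0 =
      (partition.countP (durfeeCBool (partition.length : Int) d) : Int) := by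
    intro d hd1 hdn
    rw [durfeeBCount_getD (partition.length : Int) (by omega) partition _ hrep d (by omega) hdn]
    have hz : PySem.List.pyGetD (List.replicate (partition.length + 1) (0 : Int)) d 0 = 0 := by
      rw [PySem.List.pyGetD_eq_getElem _ 0 (by omega) (by omega)]
      exact List.getElem_replicate _
    rw [hz]
    ring
  have h := durfeeBLoop_good partition _ hcnt partition.length (partition.length : Int)
    (by omega) (by omega) (fun k hk1 hk2 => by omega)
  have hz : (partition.countP (durfeeGBool (partition.length : Int) ((partition.length : Int) + 1)) : Int) = 0 := by
    rw [durfeeG_top]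
    rfl
  rw [hz] at h
  exact h

-- ===== VERDICT (by name: the statement is the Claim_ definition above) =====
theorem durfee_size_spec : Claim_equal_durfee_size := by
  intro partition _
  unfold Spec_durfee_size
  exact durfeeGood_unique partition _ _ (durfeeA_good partition) (durfeeB_good partition)
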